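-- pv_equiv track=rewrite | github.com/gnragazzi/project_euler | problema_32/p.py | listarPosiblesMultiplicadoreDeMultiplicando
-- ===== SOURCE A (Python) =====
-- digitosDecimales = [x for x in range(1,10)]
--
-- valorMaximo = 10000
--
-- def listarPosiblesMultiplicadoreDeMultiplicando(x):
--     limiteSuperior = valorMaximo // obtenerNumeroDeLista(x)
--     aux = digitosDecimales[:]
--     for digito in x:
--         aux.remove(digito)
--     if len(x) == 1:
--         return [[x,y,z,w] for x in aux for y in aux for z in aux for w in aux if x != y and x!=z and x!=w and y!=z and y!=w and z!=w and (x*1000 + y*100 + z* 10 + w) <= limiteSuperior ]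
--     elif  len(x) == 2:
--         return [[x,y,z] for x in aux for y in aux for z in aux if x != y and x!=z and y!=z and (x*100 + y*10 + z) <= limiteSuperior]
--     else:
--        raise ValueError('Wrong Multiplicand number of digits')
--
-- def obtenerNumeroDeLista(x):
--     res = 0
--     for i in range(len(x)):
--         res = res + x[i] * (10**(len(x)-1-i))
--     return res
-- ===== SOURCE B (Python) =====
-- digitosDecimales = [x for x in range(1, 10)]
--
-- valorMaximo = 10000
--
--
-- def _valor(digitos):
--     # decimal value of a digit list, by Horner's rule
--     v = 0
--     for d in digitos:
--         v = v * 10 + d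
--     return v
--
--
-- def _selections(pool):
--     # pairs (element, pool without that element), in pool order
--     if not pool:
--         return []
--     head, tail = pool[0], pool[1:]
--     return [(head, tail)] + [(d, [head] + rest) for d, rest in _selections(tail)]
--
--
-- def _perms(pool, n):
--     # all length-n arrangements of pool's elements, in lexicographic pool order
--     if n == 0:
--         return [[]]
--     return [[d] + rest for d, sub in _selections(pool) for rest in _perms(sub, n - 1)]
--
--
-- def listarPosiblesMultiplicadoreDeMultiplicando(x):
--     limiteSuperior = valorMaximo // _valor(x)
--     if len(x) not in (1, 2) or len(set(x)) != len(x) \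
--             or any(d not in digitosDecimales for d in x):
--         raise ValueError('Wrong Multiplicand number of digits')
--     aux = [d for d in digitosDecimales if d not in x]
--     n = 5 - len(x)
--     return [p for p in _perms(aux, n) if _valor(p) <= limiteSuperior]
-- ===== Notes on version B (the rewrite author's own statement) =====
-- stated objective: simpler
-- what changed: B replaces the two hardcoded branches of 4-fold/3-fold nested loops with an all-distinct filter by one parameterized pass that generates only distinct tuples via a recursive permutations helper, and computes the list's numeric value by a Horner fold instead of positional powers.
import Mathlib
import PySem

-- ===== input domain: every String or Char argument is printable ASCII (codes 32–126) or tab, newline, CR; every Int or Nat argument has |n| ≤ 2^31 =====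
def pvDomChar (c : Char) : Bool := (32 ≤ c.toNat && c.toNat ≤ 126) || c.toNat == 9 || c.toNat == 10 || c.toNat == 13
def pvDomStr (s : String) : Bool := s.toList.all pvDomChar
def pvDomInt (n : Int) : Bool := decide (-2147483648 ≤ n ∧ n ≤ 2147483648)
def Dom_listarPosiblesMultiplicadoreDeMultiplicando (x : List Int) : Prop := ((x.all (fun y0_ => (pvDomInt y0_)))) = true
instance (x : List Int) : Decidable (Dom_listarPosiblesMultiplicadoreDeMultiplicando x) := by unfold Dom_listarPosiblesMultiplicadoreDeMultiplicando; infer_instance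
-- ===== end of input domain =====

-- B: one parameterized pass over recursive distinct permutations instead of two hardcoded
-- branches of nested loops with an all-distinct filter; Horner fold for the numeric value.


-- ===== PORT A =====
def digitosDecimales : List Int := [1, 2, 3, 4, 5, 6, 7, 8, 9]

def valorMaximo : Int := 10000

def obtenerNumeroDeLista (x : List Int) : Int :=
  (List.range x.length).foldl
    (fun (res : Int) (i : Nat) => res + ((PySem.List.pyGet? x (i : Int)).getD 0) * (10 : Int) ^ (x.length - 1 - i)) 0

-- a failing remove raises ValueError in Python; the port keeps the list (excluded by Pre_)
def listarPosiblesMultiplicadoreDeMultiplicando (x : List Int) : List (List Int) :=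
  let limiteSuperior := PySem.Int.floordiv valorMaximo (obtenerNumeroDeLista x)
  let aux := x.foldl (fun acc digito => (PySem.List.remove? acc digito).getD acc) digitosDecimales
  if x.length = 1 then
    aux.flatMap fun a => aux.flatMap fun b => aux.flatMap fun c => aux.flatMap fun d =>
      if a ≠ b ∧ a ≠ c ∧ a ≠ d ∧ b ≠ c ∧ b ≠ d ∧ c ≠ d ∧
          a * 1000 + b * 100 + c * 10 + d ≤ limiteSuperior then [[a, b, c, d]] else []
  else if x.length = 2 then
    aux.flatMap fun a => aux.flatMap fun b => aux.flatMap fun c =>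
      if a ≠ b ∧ a ≠ c ∧ b ≠ c ∧ a * 100 + b * 10 + c ≤ limiteSuperior then [[a, b, c]] else []
  else []  -- raise ValueError (excluded by Pre_)

-- ===== PORT B =====
def pvValor (digitos : List Int) : Int :=
  digitos.foldl (fun v d => v * 10 + d) 0

def pvSelections : List Int → List (Int × List Int)
  | [] => []
  | head :: tail => (head, tail) :: (pvSelections tail).map (fun p => (p.1, head :: p.2))

def pvPerms : List Int → Nat → List (List Int)
  | _, 0 => [[]]
  | pool, n + 1 =>
    (pvSelections pool).flatMap fun p => (pvPerms p.2 n).map (fun rest => p.1 :: rest)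

def listarPosiblesMultiplicadoreDeMultiplicando_alt (x : List Int) : List (List Int) :=
  let limiteSuperior := PySem.Int.floordiv valorMaximo (pvValor x)
  if ¬ (x.length = 1 ∨ x.length = 2) ∨ (PySem.Set.ofList x).length ≠ x.length ∨
      x.any (fun d => !digitosDecimales.contains d) then []  -- raise ValueError
  else
    let aux := digitosDecimales.filter (fun d => !x.contains d)
    let n := 5 - x.length
    (pvPerms aux n).filter (fun p => decide (pvValor p ≤ limiteSuperior))

-- ===== PRECONDITION & SPEC =====
-- A returns normally iff x has 1 or 2 entries, all distinct digits in 1..9 (otherwise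
-- list.remove or the length check raises ValueError, or // raises ZeroDivisionError).
def Pre_listarPosiblesMultiplicadoreDeMultiplicando (x : List Int) : Prop :=
  (x.length = 1 ∨ x.length = 2) ∧ x.Nodup ∧ ∀ d ∈ x, 1 ≤ d ∧ d ≤ 9
instance (x : List Int) : Decidable (Pre_listarPosiblesMultiplicadoreDeMultiplicando x) := by unfold Pre_listarPosiblesMultiplicadoreDeMultiplicando; infer_instance

def pvWitness_listarPosiblesMultiplicadoreDeMultiplicando : List Int := [1]

def Spec_listarPosiblesMultiplicadoreDeMultiplicando (x : List Int) (out : List (List Int)) : Prop := out = listarPosiblesMultiplicadoreDeMultiplicando_alt x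
instance (x : List Int) (out : List (List Int)) : Decidable (Spec_listarPosiblesMultiplicadoreDeMultiplicando x out) := by unfold Spec_listarPosiblesMultiplicadoreDeMultiplicando; infer_instance

-- ===== CLAIM (what is proved, stated in full; the proofs are below) =====
def Claim_equal_listarPosiblesMultiplicadoreDeMultiplicando : Prop := ∀ (x : List Int), Dom_listarPosiblesMultiplicadoreDeMultiplicando x → Pre_listarPosiblesMultiplicadoreDeMultiplicando x → Spec_listarPosiblesMultiplicadoreDeMultiplicando x (listarPosiblesMultiplicadoreDeMultiplicando x)

-- ===== LEMMAS AND PROOFS =====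
set_option maxHeartbeats 2000000
set_option maxRecDepth 20000

def pvChk1 : Bool := (List.range 9).all fun i =>
  listarPosiblesMultiplicadoreDeMultiplicando [(i : Int) + 1] ==
    listarPosiblesMultiplicadoreDeMultiplicando_alt [(i : Int) + 1]

def pvChk2 : Bool := (List.range 9).all fun i => (List.range 9).all fun j =>
  (i == j) ||
    (listarPosiblesMultiplicadoreDeMultiplicando [(i : Int) + 1, (j : Int) + 1] ==
      listarPosiblesMultiplicadoreDeMultiplicando_alt [(i : Int) + 1, (j : Int) + 1])

theorem pvChk1_true : pvChk1 = true := by decide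

theorem pvChk2_true : pvChk2 = true := by decide

theorem pv_case1 (a : Int) (h1 : 1 ≤ a) (h2 : a ≤ 9) :
    listarPosiblesMultiplicadoreDeMultiplicando [a] =
      listarPosiblesMultiplicadoreDeMultiplicando_alt [a] := by
  have hi : a.toNat - 1 < 9 := by omega
  have h := List.all_eq_true.mp pvChk1_true (a.toNat - 1) (List.mem_range.mpr hi)
  have ha : ((a.toNat - 1 : Nat) : Int) + 1 = a := by omega
  rw [ha] at h
  exact eq_of_beq h

theorem pv_case2 (a b : Int) (h1 : 1 ≤ a) (h2 : a ≤ 9) (h3 : 1 ≤ b) (h4 : b ≤ 9)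
    (hne : a ≠ b) :
    listarPosiblesMultiplicadoreDeMultiplicando [a, b] =
      listarPosiblesMultiplicadoreDeMultiplicando_alt [a, b] := by
  have hi : a.toNat - 1 < 9 := by omega
  have hj : b.toNat - 1 < 9 := by omega
  have h := List.all_eq_true.mp
    (List.all_eq_true.mp pvChk2_true (a.toNat - 1) (List.mem_range.mpr hi))
    (b.toNat - 1) (List.mem_range.mpr hj)
  have ha : ((a.toNat - 1 : Nat) : Int) + 1 = a := by omega
  have hb : ((b.toNat - 1 : Nat) : Int) + 1 = b := by omega
  rw [ha, hb] at h
  rcases Bool.or_eq_true_iff.mp h with h' | h'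
  · exfalso; apply hne; have : a.toNat - 1 = b.toNat - 1 := by simpa using h'
    omega
  · exact eq_of_beq h'

-- ===== VERDICT (by name: the statement is the Claim_ definition above) =====
theorem listarPosiblesMultiplicadoreDeMultiplicando_spec : Claim_equal_listarPosiblesMultiplicadoreDeMultiplicando := by
  intro x _ hpre
  obtain ⟨hlen, hnd, hrange⟩ := hpre
  unfold Spec_listarPosiblesMultiplicadoreDeMultiplicando
  match x, hlen with
  | [a], _ =>
    have := hrange a (by simp)
    exact pv_case1 a this.1 this.2
  | [a, b], _ =>
    have ha := hrange a (by simp)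
    have hb := hrange b (by simp)
    have hne : a ≠ b := by simp at hnd; exact hnd
    exact pv_case2 a b ha.1 ha.2 hb.1 hb.2 hne
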